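-- pv_equiv track=rewrite | github.com/Tyler-Laudenslager/The-Rosetta-Stone | rosetta.py | find_no_dependencies
-- ===== SOURCE A (Python) =====
-- def find_no_dependencies(adjaceny_list):
--     """ find all starting tasks that do not
--         have dependencies.
--
--         Example:
--
--         'B' : ['A']
--         'C' : ['D','E']
--
--         returns - ['A','D','E]
--
--         Notice how the tasks 'A', 'D, and 'E'
--         are not keys in the dictionary. These tasks
--         can be executed right away, because
--         they are independent they do not depend
--         on other tasks executing before them.
--
--         input - data from the get_input() function
--                 - dictionary(string : [])
--
--         returns - list that contains the starting
--                   independent tasks that are in ascending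
--                   order with duplicates removed.
--
--     """
--     items = list()
--     for _ , value in adjaceny_list.items():
--         for item in value:
--             #if a task is in the keys
--             #it cannot be a independent task
--             if item in set(adjaceny_list.keys()):
--                 continue
--             #if a task is not in the keys
--             #we add it to the list
--             elif item not in set(items):
--                 items.append(item)
--
--     return sorted(items)
-- ===== SOURCE B (Python) =====
-- def find_no_dependencies(adjaceny_list):
--     """Sort-then-scan: sort all dependency items once, then a single linear
--     sweep that skips keys and drops adjacent duplicates (equal items are
--     adjacent in a sorted list, so no 'seen' set is needed)."""
--     flat = sorted(item for deps in adjaceny_list.values() for item in deps)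
--     out = []
--     for item in flat:
--         if item not in adjaceny_list:
--             if not out or out[-1] != item:
--                 out.append(item)
--     return out
-- ===== Notes on version B (the rewrite author's own statement) =====
-- stated objective: faster
-- what changed: Instead of A's per-item 'is-key / already-seen' accumulation (rebuilding set(keys) and set(items) for every dependency item) followed by a final sort, B sorts the concatenated dependency lists first and then does one linear sweep that skips dict keys (O(1) dict membership) and removes duplicates by comparing with the previous kept element, needing no seen-set at all.
import Mathlib
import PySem

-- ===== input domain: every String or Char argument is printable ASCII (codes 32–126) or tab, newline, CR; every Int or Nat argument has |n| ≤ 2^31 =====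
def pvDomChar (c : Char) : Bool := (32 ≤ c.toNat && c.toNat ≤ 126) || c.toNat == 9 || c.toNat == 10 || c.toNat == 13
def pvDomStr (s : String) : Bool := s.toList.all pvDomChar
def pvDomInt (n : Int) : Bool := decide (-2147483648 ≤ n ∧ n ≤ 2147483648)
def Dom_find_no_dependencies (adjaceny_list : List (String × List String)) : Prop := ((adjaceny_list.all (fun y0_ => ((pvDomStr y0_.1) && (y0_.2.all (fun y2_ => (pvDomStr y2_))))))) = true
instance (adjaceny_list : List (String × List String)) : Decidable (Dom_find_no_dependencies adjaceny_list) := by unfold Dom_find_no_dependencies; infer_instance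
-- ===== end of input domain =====

-- B sorts the concatenated dependency lists first, then one sweep that skips keys and
-- drops adjacent duplicates, instead of A's per-item key/seen accumulation then sort (faster).

-- ===== PORT A =====
def find_no_dependencies (adjaceny_list : List (String × List String)) : List String :=
  -- items = list(); for _, value in adjaceny_list.items(): for item in value: …
  let items := adjaceny_list.foldl (fun items kv =>
    kv.2.foldl (fun items item =>
      if PySem.Set.contains (PySem.Set.ofList (adjaceny_list.map Prod.fst)) item then items
      else if PySem.Set.contains (PySem.Set.ofList items) item then items
      else items ++ [item]) items) []
  PySem.List.sorted items (fun x => x) false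

-- ===== PORT B =====
def find_no_dependencies_alt (adjaceny_list : List (String × List String)) : List String :=
  -- flat = sorted(item for deps in adjaceny_list.values() for item in deps)
  let flat := PySem.List.sorted (adjaceny_list.flatMap (fun kv => kv.2)) (fun x => x) false
  -- for item in flat: if item not in adjaceny_list: if not out or out[-1] != item: out.append(item)
  flat.foldl (fun out item =>
    if (adjaceny_list.map Prod.fst).contains item then out
    else if out.getLast? = some item then out   -- 'not out or out[-1] != item' negated
    else out ++ [item]) []

-- ===== PRECONDITION & SPEC =====
def Spec_find_no_dependencies (adjaceny_list : List (String × List String)) (out : List String) : Prop := out = find_no_dependencies_alt adjaceny_list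
instance (adjaceny_list : List (String × List String)) (out : List String) : Decidable (Spec_find_no_dependencies adjaceny_list out) := by unfold Spec_find_no_dependencies; infer_instance

-- ===== CLAIM (what is proved, stated in full; the proofs are below) =====
def Claim_equal_find_no_dependencies : Prop := ∀ (adjaceny_list : List (String × List String)), Dom_find_no_dependencies adjaceny_list → Spec_find_no_dependencies adjaceny_list (find_no_dependencies adjaceny_list)

-- ===== LEMMAS AND PROOFS =====

-- A's inner loop over one dependency list keeps 'items = deps.filter (not a key)'
theorem pv_inner (keys : List String) (v : List String) :
    ∀ (s : List String),
      v.foldl (fun items item =>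
        if PySem.Set.contains (PySem.Set.ofList keys) item then items
        else if PySem.Set.contains (PySem.Set.ofList items) item then items
        else items ++ [item]) (s.filter (fun x => !keys.contains x))
      = (PySem.Set.update s v).filter (fun x => !keys.contains x) := by
  induction v with
  | nil => intro s; simp [PySem.Set.update]
  | cons x v ih =>
    intro s
    simp only [List.foldl_cons, PySem.Set.update, PySem.Set.contains_eq_listContains] at *
    by_cases hk : keys.contains x
    · have hk2 : x ∈ keys := by simpa [List.contains_eq_mem] using hk
      have hadd : (PySem.Set.add s x).filter (fun y => !keys.contains y)
          = s.filter (fun y => !keys.contains y) := by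
        unfold PySem.Set.add
        split
        · rfl
        · simp [List.filter_append, List.contains_eq_mem, hk2]
      rw [if_pos (by simpa [List.contains_eq_mem] using hk2), ← hadd]
      exact ih (PySem.Set.add s x)
    · have hk' : x ∉ keys := by simpa [List.contains_eq_mem] using hk
      have hmem : (s.filter (fun y => !keys.contains y)).contains x = s.contains x := by
        simp [List.contains_eq_mem, List.mem_filter, hk']
      by_cases hs : s.contains x
      · have hs' : x ∈ s := by simpa [List.contains_eq_mem] using hs
        have hadd : PySem.Set.add s x = s := by
          unfold PySem.Set.add; simp [PySem.Set.contains, List.contains_eq_mem, hs']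
        simp only [List.contains_eq_mem] at hk' hmem hs
        rw [if_neg (by simpa using hk'), if_pos (by simp [List.mem_filter, hs', hk']), hadd]
        exact ih s
      · have hs' : x ∉ s := by simpa [List.contains_eq_mem] using hs
        have hadd : PySem.Set.add s x = s ++ [x] := by
          unfold PySem.Set.add; simp [PySem.Set.contains, List.contains_eq_mem, hs']
        have hfil : (s ++ [x]).filter (fun y => !keys.contains y)
            = s.filter (fun y => !keys.contains y) ++ [x] := by
          simp [List.filter_append, hk']
        rw [if_neg (by simpa using hk'), if_neg (by simp [List.mem_filter, hs']), hadd, ← hfil]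
        exact ih (s ++ [x])

-- A's outer loop keeps the same relation against a running PySem.Set.update
theorem pv_outer (keys : List String) (l : List (String × List String)) :
    ∀ (s : List String),
      l.foldl (fun items kv =>
        kv.2.foldl (fun items item =>
          if PySem.Set.contains (PySem.Set.ofList keys) item then items
          else if PySem.Set.contains (PySem.Set.ofList items) item then items
          else items ++ [item]) items) (s.filter (fun x => !keys.contains x))
      = (l.foldl (fun deps kv => PySem.Set.update deps kv.2) s).filter
          (fun x => !keys.contains x) := by
  induction l with
  | nil => intro s; rfl
  | cons kv l ih =>
    intro s
    simp only [List.foldl_cons]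
    rw [pv_inner keys kv.2 s, ih (PySem.Set.update s kv.2)]

-- folding Set.update over the values is one update by the concatenation
theorem pv_foldl_update (l : List (String × List String)) :
    ∀ (s : List String),
      l.foldl (fun deps kv => PySem.Set.update deps kv.2) s
      = PySem.Set.update s (l.flatMap (fun kv => kv.2)) := by
  induction l with
  | nil => intro s; simp [PySem.Set.update]
  | cons kv l ih =>
    intro s
    simp only [List.foldl_cons, List.flatMap_cons, ih, PySem.Set.update_append]

-- in a strictly increasing list, a member that bounds all elements is the last one
theorem pv_last_of_max (acc : List String) (a : String)
    (hp : acc.Pairwise (· < ·)) (hmem : a ∈ acc) (hub : ∀ x ∈ acc, x ≤ a) :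
    acc.getLast? = some a := by
  induction acc with
  | nil => cases hmem
  | cons c t ih =>
    cases t with
    | nil =>
      simp at hmem; simp [hmem]
    | cons d t' =>
      have hc : ∀ y ∈ d :: t', c < y := (List.pairwise_cons.mp hp).1
      have ha : a ∈ d :: t' := by
        rcases List.mem_cons.mp hmem with h | h
        · exfalso
          have hd : c < d := hc d (by simp)
          have : d ≤ a := hub d (by simp)
          subst h; exact absurd (lt_of_lt_of_le hd this) (lt_irrefl _)
        · exact h
      rw [List.getLast?_cons_cons]
      exact ih (List.pairwise_cons.mp hp).2 ha (fun x hx => hub x (List.mem_cons_of_mem _ hx))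

-- B's sweep over a ≤-sorted list: strictly increasing result, membership = kept elements
theorem pv_sweep (q : String → Bool) :
    ∀ (l acc : List String), l.Pairwise (· ≤ ·) → acc.Pairwise (· < ·) →
      (∀ x ∈ acc, ∀ y ∈ l, x ≤ y) →
      (l.foldl (fun out item =>
        if q item then out
        else if out.getLast? = some item then out
        else out ++ [item]) acc).Pairwise (· < ·) ∧
      (∀ x, x ∈ l.foldl (fun out item =>
        if q item then out
        else if out.getLast? = some item then out
        else out ++ [item]) acc ↔ x ∈ acc ∨ (x ∈ l ∧ q x = false)) := by
  intro l
  induction l with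
  | nil => intro acc _ hacc _; exact ⟨hacc, by simp⟩
  | cons a t ih =>
    intro acc hl hacc hub
    have ht : t.Pairwise (· ≤ ·) := (List.pairwise_cons.mp hl).2
    have hat : ∀ y ∈ t, a ≤ y := (List.pairwise_cons.mp hl).1
    simp only [List.foldl_cons]
    by_cases hq : q a
    · rw [if_pos hq]
      have h := ih acc ht hacc (fun x hx y hy => hub x hx y (List.mem_cons_of_mem _ hy))
      refine ⟨h.1, fun x => ?_⟩
      rw [h.2 x]
      constructor
      · rintro (h1 | h1)
        · exact Or.inl h1
        · exact Or.inr ⟨List.mem_cons_of_mem _ h1.1, h1.2⟩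
      · rintro (h1 | ⟨h1, h2⟩)
        · exact Or.inl h1
        · rcases List.mem_cons.mp h1 with rfl | h1
          · exact absurd hq (by simp [h2])
          · exact Or.inr ⟨h1, h2⟩
    · rw [if_neg hq]
      by_cases hlast : acc.getLast? = some a
      · rw [if_pos hlast]
        have hmem : a ∈ acc := List.mem_of_getLast? hlast
        have h := ih acc ht hacc (fun x hx y hy => hub x hx y (List.mem_cons_of_mem _ hy))
        refine ⟨h.1, fun x => ?_⟩
        rw [h.2 x]
        constructor
        · rintro (h1 | h1)
          · exact Or.inl h1
          · exact Or.inr ⟨List.mem_cons_of_mem _ h1.1, h1.2⟩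
        · rintro (h1 | ⟨h1, h2⟩)
          · exact Or.inl h1
          · rcases List.mem_cons.mp h1 with rfl | h1
            · exact Or.inl hmem
            · exact Or.inr ⟨h1, h2⟩
      · rw [if_neg hlast]
        have hna : a ∉ acc := fun hmem =>
          hlast (pv_last_of_max acc a hacc hmem (fun x hx => hub x hx a (by simp)))
        have hacc' : (acc ++ [a]).Pairwise (· < ·) := by
          rw [List.pairwise_append]
          refine ⟨hacc, by simp, fun x hx y hy => ?_⟩
          have hy' : y = a := by simpa using hy
          rw [hy']
          exact lt_of_le_of_ne (hub x hx a (by simp)) (fun h => hna (h ▸ hx))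
        have hub' : ∀ x ∈ acc ++ [a], ∀ y ∈ t, x ≤ y := by
          intro x hx y hy
          rcases List.mem_append.mp hx with h | h
          · exact hub x h y (List.mem_cons_of_mem _ hy)
          · have hx' : x = a := by simpa using h
            rw [hx']; exact hat y hy
        have h := ih (acc ++ [a]) ht hacc' hub'
        refine ⟨h.1, fun x => ?_⟩
        rw [h.2 x]
        constructor
        · rintro (h1 | h1)
          · rcases List.mem_append.mp h1 with h2 | h2
            · exact Or.inl h2
            · have hx : x = a := by simpa using h2
              exact Or.inr ⟨by simp [hx], by rw [hx]; simpa using hq⟩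
          · exact Or.inr ⟨List.mem_cons_of_mem _ h1.1, h1.2⟩
        · rintro (h1 | ⟨h1, h2⟩)
          · exact Or.inl (List.mem_append_left _ h1)
          · rcases List.mem_cons.mp h1 with rfl | h1
            · exact Or.inl (List.mem_append_right _ (by simp))
            · exact Or.inr ⟨h1, h2⟩

-- ===== VERDICT (by name: the statement is the Claim_ definition above) =====
theorem find_no_dependencies_spec : Claim_equal_find_no_dependencies := by
  intro al _
  unfold Spec_find_no_dependencies find_no_dependencies find_no_dependencies_alt
  set keys := al.map Prod.fst with hkeys
  set flat := al.flatMap (fun kv => kv.2) with hflat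
  -- A's items list is the filtered first-occurrence dedup of flat
  have hA : al.foldl (fun items kv =>
      kv.2.foldl (fun items item =>
        if PySem.Set.contains (PySem.Set.ofList keys) item then items
        else if PySem.Set.contains (PySem.Set.ofList items) item then items
        else items ++ [item]) items) []
      = (PySem.Set.ofList flat).filter (fun x => !keys.contains x) := by
    have h := pv_outer keys al []
    simp only [List.filter_nil] at h
    rw [h, pv_foldl_update, PySem.Set.update_nil_left]
  -- B's sweep result
  have hsortflat : (PySem.List.sorted flat (fun x => x) false).Pairwise (· ≤ ·) :=
    PySem.List.sorted_pairwise flat (fun x => x)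
  have hB := pv_sweep (fun item => keys.contains item)
      (PySem.List.sorted flat (fun x => x) false) [] hsortflat (by simp) (by simp)
  set r := (PySem.List.sorted flat (fun x => x) false).foldl (fun out item =>
      if keys.contains item then out
      else if out.getLast? = some item then out
      else out ++ [item]) [] with hr
  -- they are permutations, both duplicate-free, B strictly sorted
  have hX : ∀ x, x ∈ (PySem.Set.ofList flat).filter (fun x => !keys.contains x) ↔
      x ∈ flat ∧ keys.contains x = false := by
    intro x
    simp [List.mem_filter, PySem.Set.mem_ofList]
  have hRmem : ∀ x, x ∈ r ↔ x ∈ flat ∧ keys.contains x = false := by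
    intro x
    rw [hB.2 x]
    simp [PySem.List.mem_sorted]
  have hperm : r.Perm ((PySem.Set.ofList flat).filter (fun x => !keys.contains x)) := by
    rw [List.perm_ext_iff_of_nodup hB.1.nodup
      ((PySem.Set.nodup_ofList flat).filter _)]
    intro x; rw [hRmem x, hX x]
  rw [hA]
  show PySem.List.sorted ((PySem.Set.ofList flat).filter (fun x => !keys.contains x))
      (fun x => x) false = r
  exact PySem.List.sorted_eq_of_perm_of_pairwise_lt _ _ (fun x => x) hperm hB.1
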